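-- pv_equiv track=rewrite | github.com/max-49/usaco | feb-2022/spell_old.py | blocked
-- ===== SOURCE A (Python) =====
-- def blocked(word, blockss):
--     for letter in word:
--         for block in blockss:
--             if letter in block:
--                 blockss.remove(block)
--                 break
--         else:
--             # letter in no blocks
--             return "NO"
--     return "YES"
-- ===== SOURCE B (Python) =====
-- def blocked(word, blockss):
--     # Inverted index: for each character, the (possibly repeated) block indices
--     # containing it, in increasing order. For each letter of the word, an advancing
--     # per-letter pointer finds the earliest not-yet-used block containing it.
--     index = {}
--     for i, block in enumerate(blockss):
--         for ch in block:
--             index.setdefault(ch, []).append(i)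
--     used = set()
--     pos = {}
--     for letter in word:
--         lst = index.get(letter, [])
--         p = pos.get(letter, 0)
--         while p < len(lst) and lst[p] in used:
--             p += 1
--         if p == len(lst):
--             return "NO"
--         used.add(lst[p])
--         pos[letter] = p + 1
--     return "YES"
-- ===== Notes on version B (the rewrite author's own statement) =====
-- stated objective: faster
-- what changed: Replaced A's per-letter rescan of all remaining blocks (substring test per block plus list.remove) by a one-pass inverted index from character to block indices with a used-set and per-letter advancing pointers, so each letter takes the earliest unused block from its own index list.
import Mathlib
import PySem

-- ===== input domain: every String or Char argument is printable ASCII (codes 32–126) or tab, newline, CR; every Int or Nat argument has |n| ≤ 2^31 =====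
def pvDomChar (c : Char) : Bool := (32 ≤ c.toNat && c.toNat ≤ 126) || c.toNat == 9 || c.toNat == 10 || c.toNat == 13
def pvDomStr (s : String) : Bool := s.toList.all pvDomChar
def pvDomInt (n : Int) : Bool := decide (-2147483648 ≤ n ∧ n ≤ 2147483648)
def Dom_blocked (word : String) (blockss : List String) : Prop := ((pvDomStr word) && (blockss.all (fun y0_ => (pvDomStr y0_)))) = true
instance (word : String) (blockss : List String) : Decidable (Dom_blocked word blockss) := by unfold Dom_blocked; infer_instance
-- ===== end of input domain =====

-- B replaces A's per-letter rescan of the remaining blocks by an inverted index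
-- (character → block indices) plus a used-set and per-letter advancing pointers,
-- taking for each letter the earliest unused block containing it. A mutates its
-- `blockss` argument in place (removes matched blocks), B does not: the equivalence
-- proved here is about the return value only.

-- ===== PORT A =====
-- for letter in word: scan blockss for the first block with `letter in block`,
-- remove it and break; if no block matches, return "NO"; after the loop, "YES".
def blockedGoA : List Char → List String → String
  | [], _ => "YES"
  | c :: cs, bs =>
    match bs.find? (fun b => PySem.Chars.isIn [c] b.toList) with
    | none => "NO"
    | some b => blockedGoA cs ((PySem.List.remove? bs b).getD bs)

def blocked (word : String) (blockss : List String) : String :=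
  blockedGoA word.toList blockss

-- ===== PORT B =====
-- index = {}; for i, block in enumerate(blockss): for ch in block: index.setdefault(ch, []).append(i)
def blockedIndex (blockss : List String) : PySem.Dict Char (List Int) :=
  (PySem.List.enumerate blockss).foldl
    (fun d p => p.2.toList.foldl (fun d ch => d.insert ch (d.getD ch [] ++ [p.1])) d)
    PySem.Dict.empty

-- while p < len(lst) and lst[p] in used: p += 1
def skipB (lst : List Int) (used : PySem.Set Int) (p : Nat) : Nat :=
  if p < lst.length ∧ PySem.Set.contains used (lst.getD p 0) = true then
    skipB lst used (p + 1)
  else p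
termination_by lst.length - p
decreasing_by omega

-- for letter in word: lst = index.get(letter, []); p = pos.get(letter, 0); skip used;
-- if p == len(lst): return "NO"; used.add(lst[p]); pos[letter] = p + 1
def blockedGoB (idx : PySem.Dict Char (List Int)) :
    List Char → PySem.Set Int → PySem.Dict Char Int → String
  | [], _, _ => "YES"
  | c :: cs, used, pos =>
    let lst := idx.getD c []
    let p := skipB lst used (pos.getD c 0).toNat
    if p = lst.length then "NO"
    else blockedGoB idx cs (PySem.Set.add used (lst.getD p 0)) (pos.insert c ((p : Int) + 1))

def blocked_alt (word : String) (blockss : List String) : String :=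
  blockedGoB (blockedIndex blockss) word.toList PySem.Set.empty PySem.Dict.empty

-- ===== PRECONDITION & SPEC =====
def Spec_blocked (word : String) (blockss : List String) (out : String) : Prop := out = blocked_alt word blockss
instance (word : String) (blockss : List String) (out : String) : Decidable (Spec_blocked word blockss out) := by unfold Spec_blocked; infer_instance

-- ===== CLAIM (what is proved, stated in full; the proofs are below) =====
def Claim_equal_blocked : Prop := ∀ (word : String) (blockss : List String), Dom_blocked word blockss → Spec_blocked word blockss (blocked word blockss)

-- ===== LEMMAS AND PROOFS =====

-- Reference greedy: over the enumerated (index, block) pairs, erase the first hit.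
def refGo : List Char → List (Int × String) → String
  | [], _ => "YES"
  | c :: cs, ps =>
    match ps.find? (fun p => decide (c ∈ p.2.toList)) with
    | none => "NO"
    | some _ => refGo cs (ps.eraseP (fun p => decide (c ∈ p.2.toList)))

-- `letter in block` for a one-character needle is list membership.
theorem singleton_isIn_eq (c : Char) (l : List Char) :
    PySem.Chars.isIn [c] l = decide (c ∈ l) := by
  by_cases h : c ∈ l
  · simp only [h, decide_true]
    rw [PySem.Chars.isIn_iff_infix]
    obtain ⟨s, t, rfl⟩ := List.append_of_mem h
    exact ⟨s, t, by simp⟩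
  · simp only [h, decide_false]
    rw [PySem.Chars.isIn_eq_false_iff]
    intro hinf
    exact h (hinf.subset (by simp))

-- erasing the value returned by find? = eraseP with the same predicate
theorem erase_of_find?_eq {α : Type} [DecidableEq α] (Q : α → Bool) :
    ∀ (l : List α) (b : α), l.find? Q = some b → l.erase b = l.eraseP Q := by
  intro l
  induction l with
  | nil => intro b h; simp at h
  | cons x xs ih =>
    intro b h
    by_cases hx : Q x
    · rw [List.find?_cons_of_pos hx] at h
      cases h
      simp [hx]
    · rw [List.find?_cons_of_neg hx] at h
      have hb : Q b = true := List.find?_some h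
      have hxb : x ≠ b := fun e => hx (e ▸ hb)
      simp [hxb, hx, ih b h]

-- A simulates refGo through `map (·.2)`.
theorem A_eq_ref : ∀ (cs : List Char) (ps : List (Int × String)),
    blockedGoA cs (ps.map (·.2)) = refGo cs ps := by
  intro cs
  induction cs with
  | nil => intro ps; rfl
  | cons c cs ih =>
    intro ps
    unfold blockedGoA refGo
    have hpred : (fun b : String => PySem.Chars.isIn [c] b.toList)
        = (fun b : String => decide (c ∈ b.toList)) := by
      funext b; exact singleton_isIn_eq c b.toList
    rw [hpred]
    rw [List.find?_map]
    have hco : ((fun b : String => decide (c ∈ b.toList)) ∘ (·.2))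
        = (fun p : Int × String => decide (c ∈ p.2.toList)) := rfl
    rw [hco]
    cases hf : ps.find? (fun p : Int × String => decide (c ∈ p.2.toList)) with
    | none => simp
    | some p =>
      simp only [hf, Option.map_some]
      have hmem : p.2 ∈ ps.map (·.2) := by
        have := List.mem_of_find?_eq_some hf
        exact List.mem_map_of_mem this
      have hfind : (ps.map (·.2)).find? (fun b : String => decide (c ∈ b.toList)) = some p.2 := by
        rw [List.find?_map, hco, hf]; rfl
      rw [PySem.List.remove?_eq_some_erase _ _ hmem]
      simp only [Option.getD_some]
      rw [erase_of_find?_eq _ _ _ hfind, List.eraseP_map, hco]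
      exact ih _

-- occurrence list of a character over enumerated pairs
def occAux (ps : List (Int × String)) (c : Char) : List Int :=
  ps.flatMap (fun p => (p.2.toList.filter (· == c)).map (fun _ => p.1))

theorem inner_getD (i : Int) : ∀ (chars : List Char) (d : PySem.Dict Char (List Int)) (c : Char),
    (chars.foldl (fun d ch => d.insert ch (d.getD ch [] ++ [i])) d).getD c []
      = d.getD c [] ++ (chars.filter (· == c)).map (fun _ => i) := by
  intro chars
  induction chars with
  | nil => intro d c; simp
  | cons ch chs ih =>
    intro d c
    simp only [List.foldl_cons, List.filter_cons]
    rw [ih]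
    rw [PySem.Dict.getD_insert]
    by_cases h : ch = c
    · subst h; simp
    · have hb : (ch == c) = false := by simp [h]
      have hc2 : ¬ (c = ch) := fun e => h e.symm
      simp [hb, hc2]

theorem outer_getD : ∀ (ps : List (Int × String)) (d : PySem.Dict Char (List Int)) (c : Char),
    (ps.foldl (fun d p => p.2.toList.foldl (fun d ch => d.insert ch (d.getD ch [] ++ [p.1])) d) d).getD c []
      = d.getD c [] ++ occAux ps c := by
  intro ps
  induction ps with
  | nil => intro d c; simp [occAux]
  | cons p ps ih =>
    intro d c
    simp only [List.foldl_cons]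
    rw [ih, inner_getD]
    simp [occAux, List.append_assoc]

theorem index_getD (blockss : List String) (c : Char) :
    (blockedIndex blockss).getD c [] = occAux (PySem.List.enumerate blockss) c := by
  unfold blockedIndex
  rw [outer_getD]
  simp [PySem.Dict.getD_empty]

theorem find?_const_map {β : Type} (P : Int → Bool) (a : Int) (l : List β) :
    (l.map (fun _ => a)).find? P = if l ≠ [] ∧ P a then some a else none := by
  cases l with
  | nil => simp
  | cons x xs =>
    by_cases h : P a
    · simp [List.find?_cons, h]
    · simp only [List.map_cons]
      rw [List.find?_cons_of_neg (by simpa using h)]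
      induction xs with
      | nil => simp [h]
      | cons y ys ihy => simpa [h] using ihy

theorem find?_occAux (P : Int → Bool) : ∀ (ps : List (Int × String)) (c : Char),
    (occAux ps c).find? P
      = (ps.find? (fun p => decide (c ∈ p.2.toList) && P p.1)).map (·.1) := by
  intro ps
  induction ps with
  | nil => intro c; simp [occAux]
  | cons p ps ih =>
    intro c
    simp only [occAux, List.flatMap_cons, List.find?_append]
    rw [find?_const_map]
    by_cases hc : c ∈ p.2.toList
    · have hne : p.2.toList.filter (· == c) ≠ [] := by
        simp only [ne_eq, List.filter_eq_nil_iff]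
        push_neg
        exact ⟨c, hc, by simp⟩
      by_cases hP : P p.1
      · simp [hne, hP, List.find?_cons, hc]
      · simp only [hne, hP, ne_eq, not_false_iff, true_and, if_neg, Option.none_or]
        rw [List.find?_cons_of_neg (by simp [hc, hP])]
        exact ih c
    · have he : p.2.toList.filter (· == c) = [] := by
        simp only [List.filter_eq_nil_iff]
        intro a ha hb
        exact hc ((by simpa using hb : a = c) ▸ ha)
      simp only [he, List.map_nil, ne_eq, not_true_eq_false, false_and, if_false, Option.none_or]
      rw [List.find?_cons_of_neg (by simp [hc])]
      exact ih c

-- filtering out a freshly used index = eraseP of the found pair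
theorem filter_ne_eq_eraseP (c : Char) :
    ∀ (l : List (Int × String)) (p : Int × String),
    l.Pairwise (fun a b => a.1 ≠ b.1) →
    l.find? (fun q => decide (c ∈ q.2.toList)) = some p →
    l.filter (fun q => !(q.1 == p.1)) = l.eraseP (fun q => decide (c ∈ q.2.toList)) := by
  intro l
  induction l with
  | nil => intro p _ h; simp at h
  | cons x xs ih =>
    intro p hpw hf
    have hpw' := (List.pairwise_cons.mp hpw)
    by_cases hx : (c ∈ x.2.toList)
    · rw [List.find?_cons_of_pos (by simpa using hx)] at hf
      cases hf
      rw [List.eraseP_cons_of_pos (by simpa using hx)]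
      simp only [List.filter_cons, beq_self_eq_true, Bool.not_true, if_false]
      exact List.filter_eq_self.mpr (fun q hq => by simpa using fun e => (hpw'.1 q hq) e.symm)
    · rw [List.find?_cons_of_neg (by simpa using hx)] at hf
      rw [List.eraseP_cons_of_neg (by simpa using hx)]
      have hpmem : p ∈ xs := List.mem_of_find?_eq_some hf
      have hxpb : (!(x.1 == p.1)) = true := by simpa using hpw'.1 p hpmem
      simp only [List.filter_cons, hxpb, if_pos]
      rw [ih p hpw.of_cons hf]

theorem find?_filter' {α : Type} (l : List α) (p q : α → Bool) :
    (l.filter q).find? p = l.find? (fun x => q x && p x) := by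
  induction l with
  | nil => rfl
  | cons x xs ih =>
    by_cases hq : q x
    · by_cases hp : p x
      · simp [List.filter_cons, hq, List.find?_cons, hp]
      · simp only [List.filter_cons, hq, if_pos]
        rw [List.find?_cons_of_neg (by simp [hp]), List.find?_cons_of_neg (by simp [hp]), ih]
    · simp only [List.filter_cons, hq, if_neg, Bool.false_eq_true, not_false_iff]
      rw [List.find?_cons_of_neg (by simp [hq]), ih]

theorem skip_spec (lst : List Int) (used : PySem.Set Int) :
    ∀ (p0 : Nat), p0 ≤ lst.length →
    (∀ k, k < p0 → PySem.Set.contains used (lst.getD k 0) = true) →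
    p0 ≤ skipB lst used p0 ∧ skipB lst used p0 ≤ lst.length ∧
    (∀ k, k < skipB lst used p0 → PySem.Set.contains used (lst.getD k 0) = true) ∧
    (skipB lst used p0 < lst.length → PySem.Set.contains used (lst.getD (skipB lst used p0) 0) = false) := by
  intro p0
  induction p0 using skipB.induct lst used with
  | case1 p h ih =>
    intro hle hpre
    rw [skipB, if_pos h]
    have h2 := ih (by omega) (by
      intro k hk
      by_cases hkp : k < p
      · exact hpre k hkp
      · have : k = p := by omega
        subst this; exact h.2)
    exact ⟨by omega, h2.2.1, h2.2.2.1, h2.2.2.2⟩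
  | case2 p h =>
    intro hle hpre
    rw [skipB, if_neg h]
    refine ⟨le_refl _, hle, hpre, ?_⟩
    intro hlt
    by_contra hc
    exact h ⟨hlt, by simpa using hc⟩

theorem find?_of_prefix : ∀ (lst : List Int) (used : PySem.Set Int) (q : Nat),
    q ≤ lst.length →
    (∀ k, k < q → PySem.Set.contains used (lst.getD k 0) = true) →
    (q < lst.length → PySem.Set.contains used (lst.getD q 0) = false) →
    lst.find? (fun j => !(PySem.Set.contains used j))
      = if q < lst.length then some (lst.getD q 0) else none := by
  intro lst
  induction lst with
  | nil =>
    intro used q hq _ _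
    have hq0 : q = 0 := Nat.le_zero.mp (by simpa using hq)
    subst hq0
    simp
  | cons x xs ih =>
    intro used q hq hpre hq2
    cases q with
    | zero =>
      have hx : PySem.Set.contains used x = false := by simpa using hq2 (by simp)
      have hx' : x ∉ used := fun hm => by simp at hx; exact hx hm
      rw [List.find?_cons_of_pos (by simp [hx'])]
      simp
    | succ q' =>
      have hx : PySem.Set.contains used x = true := by simpa using hpre 0 (by omega)
      have hx' : x ∈ used := by simpa using hx
      rw [List.find?_cons_of_neg (by simp [hx'])]
      rw [ih used q' (by simp only [List.length_cons] at hq; omega) (fun k hk => by simpa using hpre (k+1) (by omega))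
        (fun h => by simpa using hq2 (by simp only [List.length_cons]; omega))]
      simp [Nat.succ_lt_succ_iff]

theorem contains_add_eq (used : PySem.Set Int) (j x : Int) :
    PySem.Set.contains (PySem.Set.add used j) x = (PySem.Set.contains used x || x == j) := by
  have hiff : (PySem.Set.contains (PySem.Set.add used j) x = true)
      ↔ ((PySem.Set.contains used x || x == j) = true) := by
    rw [PySem.Set.contains_iff, PySem.Set.mem_add]
    simp [PySem.Set.contains_iff]
  exact Bool.eq_iff_iff.mpr hiff

-- B simulates refGo: the used set filters the enumeration, and each per-letter pointer
-- sits below the first unused occurrence of that letter, with everything before it used.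
theorem B_eq_ref (blockss : List String) :
    ∀ (cs : List Char) (used : PySem.Set Int) (pos : PySem.Dict Char Int),
    (∀ c : Char, (pos.getD c 0).toNat ≤ (occAux (PySem.List.enumerate blockss) c).length ∧
      (∀ k, k < (pos.getD c 0).toNat →
        PySem.Set.contains used ((occAux (PySem.List.enumerate blockss) c).getD k 0) = true)) →
    blockedGoB (blockedIndex blockss) cs used pos
      = refGo cs ((PySem.List.enumerate blockss).filter (fun p => !(PySem.Set.contains used p.1))) := by
  intro cs
  induction cs with
  | nil => intro used pos _; rfl
  | cons c cs ih =>
    intro used pos hinv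
    simp only [blockedGoB, refGo, index_getD]
    set L := occAux (PySem.List.enumerate blockss) c with hL
    set q := skipB L used (pos.getD c 0).toNat with hq
    have hsk := skip_spec L used (pos.getD c 0).toNat (hinv c).1 (hinv c).2
    rw [← hq] at hsk
    have hfindL : L.find? (fun j => !(PySem.Set.contains used j))
        = if q < L.length then some (L.getD q 0) else none :=
      find?_of_prefix L used q hsk.2.1 hsk.2.2.1 hsk.2.2.2
    have hocc := find?_occAux (fun j => !(PySem.Set.contains used j)) (PySem.List.enumerate blockss) c
    rw [← hL] at hocc
    have hpred : (fun p : Int × String => !(PySem.Set.contains used p.1) && decide (c ∈ p.2.toList))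
        = (fun p : Int × String => decide (c ∈ p.2.toList) && !(PySem.Set.contains used p.1)) := by
      funext r; exact Bool.and_comm _ _
    rw [find?_filter', hpred]
    by_cases hql : q = L.length
    · -- no unused occurrence: both "NO"
      have : L.find? (fun j => !(PySem.Set.contains used j)) = none := by
        rw [hfindL, if_neg (by omega)]
      rw [this] at hocc
      have henum : (PySem.List.enumerate blockss).find?
          (fun p => decide (c ∈ p.2.toList) && !(PySem.Set.contains used p.1)) = none := by
        cases h : (PySem.List.enumerate blockss).find?
            (fun p => decide (c ∈ p.2.toList) && !(PySem.Set.contains used p.1)) with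
        | none => rfl
        | some r => rw [h] at hocc; simp at hocc
      rw [henum, if_pos hql]
    · have hqlt : q < L.length := by omega
      have : L.find? (fun j => !(PySem.Set.contains used j)) = some (L.getD q 0) := by
        rw [hfindL, if_pos hqlt]
      rw [this] at hocc
      obtain ⟨r, hr, hr1⟩ := Option.map_eq_some_iff.mp hocc.symm
      rw [hr]
      simp only [if_neg hql]
      rw [ih _ _ ?_]
      · -- the two recursive arguments agree
        congr 1
        have hpw : ((PySem.List.enumerate blockss).filter
            (fun p => !(PySem.Set.contains used p.1))).Pairwise (fun a b => a.1 ≠ b.1) :=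
          ((PySem.List.pairwise_lt_enumerate blockss 0).imp (fun h => Int.ne_of_lt h)).sublist List.filter_sublist
        have hfind : ((PySem.List.enumerate blockss).filter
              (fun p => !(PySem.Set.contains used p.1))).find?
              (fun w => decide (c ∈ w.2.toList)) = some r := by
          rw [find?_filter', hpred, hr]
        rw [← filter_ne_eq_eraseP c _ r hpw hfind, List.filter_filter]
        congr 1
        funext w
        rw [hr1, contains_add_eq]
        simp [Bool.not_or, Bool.and_comm]
      · -- invariant is preserved
        intro c'
        by_cases hcc : c' = c
        · subst hcc
          rw [PySem.Dict.getD_insert, if_pos rfl]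
          simp only [← hL]
          constructor
          · have : ((q : Int) + 1).toNat = q + 1 := by omega
            rw [this]; omega
          · intro k hk
            have : ((q : Int) + 1).toNat = q + 1 := by omega
            rw [this] at hk
            by_cases hkq : k < q
            · rw [contains_add_eq, hsk.2.2.1 k hkq]
              simp
            · have : k = q := by omega
              subst this
              rw [contains_add_eq]
              simp
        · rw [PySem.Dict.getD_insert, if_neg hcc]
          refine ⟨(hinv c').1, ?_⟩
          intro k hk
          rw [contains_add_eq, (hinv c').2 k hk]
          simp

-- ===== VERDICT (by name: the statement is the Claim_ definition above) =====
theorem blocked_spec : Claim_equal_blocked := by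
  intro word blockss _
  unfold Spec_blocked blocked blocked_alt
  have hA := A_eq_ref word.toList (PySem.List.enumerate blockss)
  rw [PySem.List.map_snd_enumerate] at hA
  rw [hA, B_eq_ref _ _ _ _ ?inv]
  case inv =>
    intro c
    simp [PySem.Dict.getD_empty]
  simp [PySem.Set.empty, PySem.Set.contains]
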